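-- pv_equiv track=rewrite | github.com/juancarov/Parcial1Lenguajes | punto2.py | afd
-- ===== SOURCE A (Python) =====
-- def afd(cadena):
--     estado = 'q0'
--     final = {'q1'}
--
--     letras = 'ABCDEFGHIJKLMNOPQRSTUVWXYZabcdefghijklmnopqrstuvwxyz'
--     digitos = '0123456789'
--
--     for i, simbolo in enumerate(cadena):
--         if estado == 'q0':
--             if simbolo in letras:
--                 estado = 'q1'
--             else:
--                 return 'No acepta'
--
--         elif estado == 'q1':
--             if simbolo in letras + digitos:
--                 estado = 'q1'
--             else:
--                 return 'No acepta'
--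
--     return 'Acepta' if estado in final else 'No acepta'
-- ===== SOURCE B (Python) =====
-- def afd(cadena):
--     ok = bool(cadena) and cadena[0].isascii() and cadena[0].isalpha() \
--         and all(c.isascii() and c.isalnum() for c in cadena[1:])
--     return 'Acepta' if ok else 'No acepta'
-- ===== Notes on version B (the rewrite author's own statement) =====
-- stated objective: idiomatic
-- what changed: Replaced the explicit DFA loop with state variable and early returns by a direct shape check: non-empty, first character an ASCII letter, remaining characters ASCII alphanumeric, using str.isalpha/isalnum guarded by isascii.
import Mathlib
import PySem

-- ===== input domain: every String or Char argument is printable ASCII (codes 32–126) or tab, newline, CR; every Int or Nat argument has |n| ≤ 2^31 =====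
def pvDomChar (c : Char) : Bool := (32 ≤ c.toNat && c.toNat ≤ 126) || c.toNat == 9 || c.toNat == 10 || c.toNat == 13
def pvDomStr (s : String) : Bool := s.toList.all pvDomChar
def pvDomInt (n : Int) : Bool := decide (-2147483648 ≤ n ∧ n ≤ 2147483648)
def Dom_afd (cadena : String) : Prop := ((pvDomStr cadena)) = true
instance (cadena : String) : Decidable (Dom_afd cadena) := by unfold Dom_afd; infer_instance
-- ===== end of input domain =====

-- B replaces A's explicit state-machine loop with a direct shape check (non-empty, first char
-- an ASCII letter, rest ASCII alphanumeric); objective: simpler/idiomatic, same cost.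

-- ===== PORT A =====
-- the Python constants letras / digitos, as their character lists ('simbolo in letras' is char membership)
def pvLetras : List Char := ['A','B','C','D','E','F','G','H','I','J','K','L','M','N','O','P','Q','R','S','T','U','V','W','X','Y','Z','a','b','c','d','e','f','g','h','i','j','k','l','m','n','o','p','q','r','s','t','u','v','w','x','y','z']
def pvDigitos : List Char := ['0','1','2','3','4','5','6','7','8','9']

-- the for-loop over the characters, with the early 'return' and the state variable 'estado'
def afdLoop (estado : String) (cs : List Char) : String :=
  match cs with
  | [] => if estado == "q1" then "Acepta" else "No acepta"   -- 'Acepta' if estado in final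
  | simbolo :: rest =>
    if estado == "q0" then
      if pvLetras.contains simbolo then afdLoop "q1" rest else "No acepta"
    else if estado == "q1" then
      if (pvLetras ++ pvDigitos).contains simbolo then afdLoop "q1" rest else "No acepta"
    else afdLoop estado rest

def afd (cadena : String) : String := afdLoop "q0" cadena.toList

-- ===== PORT B =====
-- Source B: 'c.isascii() and c.isalpha()' is exactly Char.isAlpha (ASCII A-Za-z); with isalnum, Char.isAlphanum
def afd_alt (cadena : String) : String :=
  let ok := match cadena.toList with
    | [] => false
    | c :: rest => c.isAlpha && rest.all Char.isAlphanum
  if ok then "Acepta" else "No acepta"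

-- ===== PRECONDITION & SPEC =====
def Spec_afd (cadena : String) (out : String) : Prop := out = afd_alt cadena
instance (cadena : String) (out : String) : Decidable (Spec_afd cadena out) := by unfold Spec_afd; infer_instance

-- ===== CLAIM (what is proved, stated in full; the proofs are below) =====
def Claim_equal_afd : Prop := ∀ (cadena : String), Dom_afd cadena → Spec_afd cadena (afd cadena)

-- ===== LEMMAS AND PROOFS =====

set_option maxRecDepth 8192 in
theorem contains_letras (c : Char) : pvLetras.contains c = c.isAlpha := by
  rw [Bool.eq_iff_iff]
  simp only [pvLetras, Char.isAlpha, Char.isUpper, Char.isLower,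
    List.contains_cons, List.contains_nil, Bool.or_false, Bool.or_eq_true,
    Bool.and_eq_true, beq_iff_eq, decide_eq_true_eq, Char.ext_iff, ← UInt32.toNat_inj,
    UInt32.le_iff_toNat_le,
    show ('A'.val.toNat)=65 from rfl,
    show ('B'.val.toNat)=66 from rfl,
    show ('C'.val.toNat)=67 from rfl,
    show ('D'.val.toNat)=68 from rfl,
    show ('E'.val.toNat)=69 from rfl,
    show ('F'.val.toNat)=70 from rfl,
    show ('G'.val.toNat)=71 from rfl,
    show ('H'.val.toNat)=72 from rfl,
    show ('I'.val.toNat)=73 from rfl,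
    show ('J'.val.toNat)=74 from rfl,
    show ('K'.val.toNat)=75 from rfl,
    show ('L'.val.toNat)=76 from rfl,
    show ('M'.val.toNat)=77 from rfl,
    show ('N'.val.toNat)=78 from rfl,
    show ('O'.val.toNat)=79 from rfl,
    show ('P'.val.toNat)=80 from rfl,
    show ('Q'.val.toNat)=81 from rfl,
    show ('R'.val.toNat)=82 from rfl,
    show ('S'.val.toNat)=83 from rfl,
    show ('T'.val.toNat)=84 from rfl,
    show ('U'.val.toNat)=85 from rfl,
    show ('V'.val.toNat)=86 from rfl,
    show ('W'.val.toNat)=87 from rfl,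
    show ('X'.val.toNat)=88 from rfl,
    show ('Y'.val.toNat)=89 from rfl,
    show ('Z'.val.toNat)=90 from rfl,
    show ('a'.val.toNat)=97 from rfl,
    show ('b'.val.toNat)=98 from rfl,
    show ('c'.val.toNat)=99 from rfl,
    show ('d'.val.toNat)=100 from rfl,
    show ('e'.val.toNat)=101 from rfl,
    show ('f'.val.toNat)=102 from rfl,
    show ('g'.val.toNat)=103 from rfl,
    show ('h'.val.toNat)=104 from rfl,
    show ('i'.val.toNat)=105 from rfl,
    show ('j'.val.toNat)=106 from rfl,
    show ('k'.val.toNat)=107 from rfl,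
    show ('l'.val.toNat)=108 from rfl,
    show ('m'.val.toNat)=109 from rfl,
    show ('n'.val.toNat)=110 from rfl,
    show ('o'.val.toNat)=111 from rfl,
    show ('p'.val.toNat)=112 from rfl,
    show ('q'.val.toNat)=113 from rfl,
    show ('r'.val.toNat)=114 from rfl,
    show ('s'.val.toNat)=115 from rfl,
    show ('t'.val.toNat)=116 from rfl,
    show ('u'.val.toNat)=117 from rfl,
    show ('v'.val.toNat)=118 from rfl,
    show ('w'.val.toNat)=119 from rfl,
    show ('x'.val.toNat)=120 from rfl,
    show ('y'.val.toNat)=121 from rfl,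
    show ('z'.val.toNat)=122 from rfl]
  omega

set_option maxRecDepth 8192 in
theorem contains_letras_digitos (c : Char) :
    (pvLetras ++ pvDigitos).contains c = c.isAlphanum := by
  rw [Bool.eq_iff_iff]
  simp only [pvLetras, pvDigitos, List.cons_append, List.nil_append,
    Char.isAlphanum, Char.isAlpha, Char.isUpper, Char.isLower, Char.isDigit,
    List.contains_cons, List.contains_nil, Bool.or_false, Bool.or_eq_true,
    Bool.and_eq_true, beq_iff_eq, decide_eq_true_eq, Char.ext_iff, ← UInt32.toNat_inj,
    UInt32.le_iff_toNat_le,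
    show ('A'.val.toNat)=65 from rfl,
    show ('B'.val.toNat)=66 from rfl,
    show ('C'.val.toNat)=67 from rfl,
    show ('D'.val.toNat)=68 from rfl,
    show ('E'.val.toNat)=69 from rfl,
    show ('F'.val.toNat)=70 from rfl,
    show ('G'.val.toNat)=71 from rfl,
    show ('H'.val.toNat)=72 from rfl,
    show ('I'.val.toNat)=73 from rfl,
    show ('J'.val.toNat)=74 from rfl,
    show ('K'.val.toNat)=75 from rfl,
    show ('L'.val.toNat)=76 from rfl,
    show ('M'.val.toNat)=77 from rfl,
    show ('N'.val.toNat)=78 from rfl,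
    show ('O'.val.toNat)=79 from rfl,
    show ('P'.val.toNat)=80 from rfl,
    show ('Q'.val.toNat)=81 from rfl,
    show ('R'.val.toNat)=82 from rfl,
    show ('S'.val.toNat)=83 from rfl,
    show ('T'.val.toNat)=84 from rfl,
    show ('U'.val.toNat)=85 from rfl,
    show ('V'.val.toNat)=86 from rfl,
    show ('W'.val.toNat)=87 from rfl,
    show ('X'.val.toNat)=88 from rfl,
    show ('Y'.val.toNat)=89 from rfl,
    show ('Z'.val.toNat)=90 from rfl,
    show ('a'.val.toNat)=97 from rfl,
    show ('b'.val.toNat)=98 from rfl,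
    show ('c'.val.toNat)=99 from rfl,
    show ('d'.val.toNat)=100 from rfl,
    show ('e'.val.toNat)=101 from rfl,
    show ('f'.val.toNat)=102 from rfl,
    show ('g'.val.toNat)=103 from rfl,
    show ('h'.val.toNat)=104 from rfl,
    show ('i'.val.toNat)=105 from rfl,
    show ('j'.val.toNat)=106 from rfl,
    show ('k'.val.toNat)=107 from rfl,
    show ('l'.val.toNat)=108 from rfl,
    show ('m'.val.toNat)=109 from rfl,
    show ('n'.val.toNat)=110 from rfl,
    show ('o'.val.toNat)=111 from rfl,
    show ('p'.val.toNat)=112 from rfl,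
    show ('q'.val.toNat)=113 from rfl,
    show ('r'.val.toNat)=114 from rfl,
    show ('s'.val.toNat)=115 from rfl,
    show ('t'.val.toNat)=116 from rfl,
    show ('u'.val.toNat)=117 from rfl,
    show ('v'.val.toNat)=118 from rfl,
    show ('w'.val.toNat)=119 from rfl,
    show ('x'.val.toNat)=120 from rfl,
    show ('y'.val.toNat)=121 from rfl,
    show ('z'.val.toNat)=122 from rfl,
    show ('0'.val.toNat)=48 from rfl,
    show ('1'.val.toNat)=49 from rfl,
    show ('2'.val.toNat)=50 from rfl,
    show ('3'.val.toNat)=51 from rfl,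
    show ('4'.val.toNat)=52 from rfl,
    show ('5'.val.toNat)=53 from rfl,
    show ('6'.val.toNat)=54 from rfl,
    show ('7'.val.toNat)=55 from rfl,
    show ('8'.val.toNat)=56 from rfl,
    show ('9'.val.toNat)=57 from rfl]
  omega

theorem afdLoop_q1 (cs : List Char) :
    afdLoop "q1" cs = if cs.all Char.isAlphanum then "Acepta" else "No acepta" := by
  induction cs with
  | nil => rfl
  | cons c rest ih =>
    simp only [afdLoop, contains_letras_digitos, List.all_cons]
    by_cases h : c.isAlphanum = true
    · simp [h, ih]
    · simp [h]

-- ===== VERDICT (by name: the statement is the Claim_ definition above) =====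
theorem afd_spec : Claim_equal_afd := by
  intro cadena _
  unfold Spec_afd afd afd_alt
  cases h : cadena.toList with
  | nil => simp [afdLoop]
  | cons c rest =>
    simp only [afdLoop, contains_letras, afdLoop_q1]
    by_cases hc : c.isAlpha = true
    · by_cases hr : rest.all Char.isAlphanum = true <;> simp [hc, hr]
    · simp [hc]
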